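-- pv_equiv track=rewrite | github.com/JamesWo/Algorithms | topcoder/division2-2/FoxAndMp3Easy.l2.SRM571.py | playList
-- ===== SOURCE A (Python) =====
-- def playList(n):
--     res = []
--     for i in range(1,n+1):
--         res.append( "%d.mp3" % i )
--     res.sort()
--     if len(res) > 50:
--         res = res[0:50]
--     return res
-- ===== SOURCE B (Python) =====
-- def playList(n):
--     # Single pass with a bounded sorted buffer of the 50 smallest names;
--     # never materialises or globally sorts the full list.
--     top = []
--     for i in range(1, n + 1):
--         s = "%d.mp3" % i
--         if len(top) < 50 or s < top[-1]:
--             j = 0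
--             while j < len(top) and top[j] <= s:
--                 j += 1
--             top.insert(j, s)
--             if len(top) > 50:
--                 top.pop()
--     return top
-- ===== Notes on version B (the rewrite author's own statement) =====
-- stated objective: alternative
-- what changed: A materialises all n names, globally sorts them and slices the first 50; B makes a single pass over 1..n maintaining a bounded sorted buffer of the 50 lexicographically smallest names (insert-or-skip with one comparison against the buffer's last element), never building or sorting the full list.
import Mathlib
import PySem

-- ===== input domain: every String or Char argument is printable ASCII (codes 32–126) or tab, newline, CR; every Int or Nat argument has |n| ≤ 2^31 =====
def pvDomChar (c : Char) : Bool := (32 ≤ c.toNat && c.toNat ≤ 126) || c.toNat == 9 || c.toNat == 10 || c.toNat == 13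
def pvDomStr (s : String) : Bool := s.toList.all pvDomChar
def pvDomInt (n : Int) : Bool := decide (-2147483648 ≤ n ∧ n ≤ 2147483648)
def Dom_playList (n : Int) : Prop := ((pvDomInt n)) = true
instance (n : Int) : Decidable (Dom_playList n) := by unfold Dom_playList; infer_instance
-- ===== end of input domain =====

-- B replaces "build all n names, sort, slice" by a single pass keeping a bounded
-- sorted buffer of the 50 smallest names (alternative algorithm, O(50) memory).


-- ===== PORT A =====
-- res.sort() is ported as the library stable sort List.mergeSort; it returns the
-- same list as PySem.List.sorted (proved in mergeSort_eq_pySorted below).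
def playList (n : Int) : List String :=
  let res := ((PySem.List.pyRange 1 (n + 1) 1).map
      (fun i => PySem.Int.toStr i ++ ".mp3")).mergeSort (fun a b => decide (a ≤ b))
  if res.length > 50 then PySem.List.slice res (some 0) (some 50) else res

-- ===== PORT B =====
-- insertion of s into the sorted buffer (the inner while + insert of Source B)
def insTop (s : String) : List String → List String
  | [] => [s]
  | t :: ts => if t ≤ s then t :: insTop s ts else s :: t :: ts

-- one iteration of Source B's loop body on the buffer ('len(top) < 50 or s < top[-1]')
def stepTop (top : List String) (s : String) : List String :=
  if decide (top.length < 50) || (match top.getLast? with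
                                  | some t => decide (s < t)
                                  | none => false) then
    let top := insTop s top
    if top.length > 50 then top.dropLast else top
  else top

def playList_alt (n : Int) : List String :=
  (PySem.List.pyRange 1 (n + 1) 1).foldl
    (fun top i => stepTop top (PySem.Int.toStr i ++ ".mp3")) []

-- ===== PRECONDITION & SPEC =====
def Spec_playList (n : Int) (out : List String) : Prop := out = playList_alt n
instance (n : Int) (out : List String) : Decidable (Spec_playList n out) := by unfold Spec_playList; infer_instance

-- ===== CLAIM (what is proved, stated in full; the proofs are below) =====
def Claim_equal_playList : Prop := ∀ (n : Int), Dom_playList n → Spec_playList n (playList n)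

-- ===== LEMMAS AND PROOFS =====

-- Source B's hand-written insertion is exactly the insertion step of Python's stable sort
lemma insTop_eq_insertBy (s : String) (l : List String) :
    insTop s l = PySem.List.insertBy (fun a b => decide (a < b)) s l := by
  induction l with
  | nil => rfl
  | cons t ts ih =>
      simp only [insTop, PySem.List.insertBy, decide_eq_true_eq]
      by_cases h : t ≤ s
      · rw [if_pos h, if_neg (by exact not_lt.mpr h), ih]
      · rw [if_neg h, if_pos (lt_of_not_ge h)]

lemma length_insertBy {α : Type} (before : α → α → Bool) (x : α) (l : List α) :
    (PySem.List.insertBy before x l).length = l.length + 1 := by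
  induction l with
  | nil => rfl
  | cons t ts ih =>
      simp only [PySem.List.insertBy]
      split
      · simp
      · simpa using ih

lemma insertBy_append_left {α : Type} (before : α → α → Bool) (x : α) (xs ys : List α)
    (h : ∃ t ∈ xs, before x t = true) :
    PySem.List.insertBy before x (xs ++ ys) = PySem.List.insertBy before x xs ++ ys := by
  induction xs with
  | nil => simp at h
  | cons t ts ih =>
      simp only [List.cons_append, PySem.List.insertBy]
      by_cases hxt : before x t = true
      · rw [if_pos hxt, if_pos hxt]; simp
      · rw [if_neg hxt, if_neg hxt, List.cons_append, ih]
        rcases h with ⟨u, hu, hxu⟩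
        rcases List.mem_cons.mp hu with rfl | hu'
        · exact absurd hxu hxt
        · exact ⟨u, hu', hxu⟩

lemma insertBy_append_right {α : Type} (before : α → α → Bool) (x : α) (xs ys : List α)
    (h : ∀ t ∈ xs, before x t = false) :
    PySem.List.insertBy before x (xs ++ ys) = xs ++ PySem.List.insertBy before x ys := by
  induction xs with
  | nil => rfl
  | cons t ts ih =>
      simp only [List.cons_append, PySem.List.insertBy]
      rw [if_neg (by simp [h t List.mem_cons_self]),
        ih (fun u hu => h u (List.mem_cons_of_mem _ hu))]

lemma pairwise_insertBy (s : String) (l : List String)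
    (h : l.Pairwise (· ≤ ·)) :
    (PySem.List.insertBy (fun a b => decide (a < b)) s l).Pairwise (· ≤ ·) := by
  induction l with
  | nil => simp [PySem.List.insertBy]
  | cons t ts ih =>
      rcases List.pairwise_cons.mp h with ⟨ht, hts⟩
      simp only [PySem.List.insertBy]
      by_cases hst : s < t
      · rw [if_pos (by simpa using hst)]
        exact List.pairwise_cons.mpr
          ⟨fun u hu => by
              rcases List.mem_cons.mp hu with rfl | hu'
              · exact le_of_lt hst
              · exact le_trans (le_of_lt hst) (ht u hu'), h⟩
      · rw [if_neg (by simpa using hst)]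
        refine List.pairwise_cons.mpr ⟨fun u hu => ?_, ih hts⟩
        rcases (PySem.List.mem_insertBy _ s u ts).mp hu with rfl | hu'
        · exact not_lt.mp hst
        · exact ht u hu'

lemma le_getLast_of_pairwise {l : List String} (h : l.Pairwise (· ≤ ·))
    (x : String) (hx : x ∈ l) (hne : l ≠ []) : x ≤ l.getLast hne := by
  obtain ⟨i, hi, rfl⟩ := List.mem_iff_getElem.mp hx
  rw [List.getLast_eq_getElem]
  rcases Nat.lt_or_ge i (l.length - 1) with hlt | hge
  · exact List.pairwise_iff_getElem.mp h i (l.length - 1) hi (by omega) hlt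
  · have hieq : i = l.length - 1 := by omega
    subst hieq; exact le_refl _

-- one loop iteration of B computes "first 50 of the insertion-sorted list"
lemma stepTop_take (acc : List String) (s : String)
    (h : acc.Pairwise (· ≤ ·)) :
    stepTop (acc.take 50) s =
      (PySem.List.insertBy (fun a b => decide (a < b)) s acc).take 50 := by
  by_cases hlen : acc.length < 50
  · rw [List.take_of_length_le (le_of_lt hlen)]
    simp only [stepTop]
    rw [if_pos (by simp [hlen]), insTop_eq_insertBy,
      if_neg (by rw [length_insertBy]; omega),
      List.take_of_length_le (by rw [length_insertBy]; omega)]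
  · -- buffer is full: acc.length ≥ 50
    have h50 : (acc.take 50).length = 50 := by
      rw [List.length_take]; omega
    have hne : acc.take 50 ≠ [] := by
      intro hc; rw [hc] at h50; simp at h50
    have hlast : (acc.take 50).getLast? = some ((acc.take 50).getLast hne) :=
      List.getLast?_eq_some_getLast hne
    set m := (acc.take 50).getLast hne with hm
    have hpw50 : (acc.take 50).Pairwise (· ≤ ·) := h.sublist (List.take_sublist _ _)
    have hsplit : acc = acc.take 50 ++ acc.drop 50 := (List.take_append_drop 50 acc).symm
    simp only [stepTop]
    rw [hlast, h50]
    by_cases hsm : s < m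
    · rw [if_pos (by simp [hsm]), insTop_eq_insertBy]
      have h51 : (PySem.List.insertBy (fun a b => decide (a < b)) s (acc.take 50)).length = 51 := by
        rw [length_insertBy, h50]
      rw [if_pos (by omega)]
      conv_rhs => rw [hsplit]
      rw [insertBy_append_left _ s _ _ ⟨m, List.getLast_mem hne, by simpa using hsm⟩,
        List.take_append_of_le_length (by omega), List.dropLast_eq_take, h51]
    · rw [if_neg (by simp [hsm])]
      conv_rhs => rw [hsplit]
      rw [insertBy_append_right _ s _ _ (fun t ht => by
          simp only [decide_eq_false_iff_not]
          intro hc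
          exact hsm (lt_of_lt_of_le hc (le_getLast_of_pairwise hpw50 t ht hne))),
        List.take_append_of_le_length (by omega), List.take_take]
      norm_num

lemma foldl_stepTop (L : List String) (acc : List String)
    (h : acc.Pairwise (· ≤ ·)) :
    L.foldl stepTop (acc.take 50) =
      (L.foldl (fun a x => PySem.List.insertBy (fun a b => decide (a < b)) x a) acc).take 50 := by
  induction L generalizing acc with
  | nil => rfl
  | cons x L ih =>
      simp only [List.foldl_cons]
      rw [stepTop_take acc x h, ih _ (pairwise_insertBy x acc h)]

-- Lean's stable merge sort agrees with Python's stable sort on strings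
lemma mergeSort_eq_pySorted (L : List String) :
    L.mergeSort (fun a b => decide (a ≤ b)) = PySem.List.sorted L (fun x => x) false := by
  refine (PySem.List.sorted_id_eq_of_perm_of_pairwise L _ (List.mergeSort_perm L _) ?_).symm
  have := List.pairwise_mergeSort (le := fun a b : String => decide (a ≤ b))
    (fun a b c hab hbc => by
      simp only [decide_eq_true_eq] at *; exact le_trans hab hbc)
    (fun a b => by simpa using le_total a b) L
  exact this.imp (by simp)

-- ===== VERDICT (by name: the statement is the Claim_ definition above) =====
theorem playList_spec : Claim_equal_playList := by
  intro n _
  show playList n = playList_alt n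
  have hB : playList_alt n =
      (PySem.List.sorted
        ((PySem.List.pyRange 1 (n + 1) 1).map (fun i => PySem.Int.toStr i ++ ".mp3"))
        (fun x => x) false).take 50 := by
    unfold playList_alt
    rw [← List.foldl_map,
      show ([] : List String) = List.take 50 [] from rfl,
      foldl_stepTop _ [] List.Pairwise.nil,
      ← PySem.List.sorted_eq_foldl_insertBy _ (fun x => x)]
  simp only [playList]
  rw [mergeSort_eq_pySorted, hB]
  split_ifs with hlen
  · rw [PySem.List.slice_zero_start,
      show (50 : Int) = ((50 : Nat) : Int) from rfl, PySem.List.slice_to_natCast]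
  · rw [List.take_of_length_le (by omega)]
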